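-- pv_equiv track=rewrite | github.com/PhoebeBC/leetcodeTop150 | Candy.py | min_treats
-- ===== SOURCE A (Python) =====
-- def dedupe_ascend(dog_ranking):
--     ranking_ordered = []
--     for rank in dog_ranking:
--         if rank not in ranking_ordered:
--             ranking_ordered.append(rank)
--     ranking_ordered.sort()
--     return ranking_ordered
--
-- def find_indices_of_rank(dog_ranking, rank):
--     indices_of_rank = []
--     for idx in range(0, len(dog_ranking)):
--         if dog_ranking[idx] == rank:
--             indices_of_rank.append(idx)
--     return indices_of_rank
--
-- def give_rank_treats(dog_ranking, number_of_treats, rank):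
--     # getting positions of all the dogs with the current rank
--     indices_of_rank = find_indices_of_rank(dog_ranking, rank)
--
--     # going through each index to check this rank's neighbours
--     for idx in indices_of_rank:
--         # Doing cases for if the rank is the first or last as then
--         # we only need to check one neighbour
--         # As we are going through the ranks in ascending order,
--         # any ranks smaller than the current rank will already have
--         # their number of treats assigned
--         if idx == 0:  # Start of dog ranking list
--             if dog_ranking[idx] > dog_ranking[idx + 1]:
--                 number_of_treats[idx] = number_of_treats[idx + 1] + 1
--             else:
--                 number_of_treats[idx] = 1
--         elif idx == len(dog_ranking) - 1:  # End of dog ranking list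
--             if dog_ranking[idx] > dog_ranking[idx - 1]:
--                 number_of_treats[idx] = number_of_treats[idx - 1] + 1
--             else:
--                 number_of_treats[idx] = 1
--         else:
--             if dog_ranking[idx] > dog_ranking[idx + 1] or dog_ranking[idx] > dog_ranking[idx - 1]:
--                 number_of_treats[idx] = max(number_of_treats[idx + 1], number_of_treats[idx - 1]) + 1
--             else:
--                 number_of_treats[idx] = 1
--
--     return number_of_treats
--
-- def min_treats(dog_ranking):
--     # Making a list to contain the number of dog treats for each dog
--     number_of_treats = [0] * len(dog_ranking)  # WORKING
--     # creating a list of the dog rankings in ascending order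
--     # without duplicates, so we can work our way through the rankings from
--     # bottom to top to assign treats
--     ranking_ordered = dedupe_ascend(dog_ranking)  # WORKING
--
--     # going through each dog ranking to assign treats to the ranking SOME REASON GIVING MORE VALUES THAN NECESARY
--     for rank in ranking_ordered:
--         # If the ranking is the smallest we assign the number of treats to be 1
--         # as each dog needs at least one sweet
--         if rank == min(ranking_ordered):  # WORKING
--             min_rank = find_indices_of_rank(dog_ranking, rank)
--             for idx in min_rank:
--                 number_of_treats[idx] = 1
--         # Otherwise we need to check if the current rank has a smaller rank either side
--         # If it does, we need to give that dog an extra sweet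
--         else:
--             # Getting the number of treats for each dog with the rank
--             give_rank_treats(dog_ranking, number_of_treats, rank)
--
--     return sum(number_of_treats)
-- ===== SOURCE B (Python) =====
-- def min_treats(dog_ranking):
--     # One stable sort of indices by rank replaces A's dedupe / per-rank rescans /
--     # repeated min() recomputation: same treat-assignment rule, applied once per
--     # dog in ascending-rank (ties: ascending-index) order.
--     n = len(dog_ranking)
--     if n <= 1:
--         return n
--     treats = [0] * n
--     for i in sorted(range(n), key=lambda i: (dog_ranking[i], i)):
--         if i == 0:
--             treats[0] = treats[1] + 1 if dog_ranking[0] > dog_ranking[1] else 1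
--         elif i == n - 1:
--             treats[i] = treats[i - 1] + 1 if dog_ranking[i] > dog_ranking[i - 1] else 1
--         elif dog_ranking[i] > dog_ranking[i + 1] or dog_ranking[i] > dog_ranking[i - 1]:
--             treats[i] = max(treats[i + 1], treats[i - 1]) + 1
--         else:
--             treats[i] = 1
--     return sum(treats)
-- ===== Notes on version B (the rewrite author's own statement) =====
-- stated objective: faster
-- what changed: Replaced A's dedupe-by-membership-scan, sorted unique ranks, per-rank whole-array rescans and per-iteration min() recomputation with a single sort of the indices by (rank, index) and one pass applying the same neighbor rule.
import Mathlib
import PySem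

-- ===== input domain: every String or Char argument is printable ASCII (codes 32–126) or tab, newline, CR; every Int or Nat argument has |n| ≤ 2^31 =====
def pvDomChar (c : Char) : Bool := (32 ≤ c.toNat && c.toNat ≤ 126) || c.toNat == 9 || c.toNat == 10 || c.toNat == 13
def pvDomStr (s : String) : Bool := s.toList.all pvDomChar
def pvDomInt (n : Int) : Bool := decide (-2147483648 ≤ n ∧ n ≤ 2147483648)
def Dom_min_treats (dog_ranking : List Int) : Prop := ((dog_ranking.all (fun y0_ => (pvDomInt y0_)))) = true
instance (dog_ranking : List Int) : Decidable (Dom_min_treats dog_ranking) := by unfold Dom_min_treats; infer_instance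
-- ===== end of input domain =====

-- B replaces A's per-rank rescans (dedupe by membership scan, re-computed min(), whole-array
-- scan per rank) with a single sort of the indices by (rank, index) and one pass; same result.

-- ===== PORT A =====
def dedupe_ascend (dog_ranking : List Int) : List Int :=
  let ranking_ordered : List Int :=
    dog_ranking.foldl (fun acc rank => if rank ∈ acc then acc else acc ++ [rank]) []
  PySem.List.sorted ranking_ordered (fun x => x)

def find_indices_of_rank (dog_ranking : List Int) (rank : Int) : List Int :=
  (PySem.List.pyRange 0 (dog_ranking.length : Int) 1).foldl
    (fun acc idx => if PySem.List.pyGetD dog_ranking idx 0 = rank then acc ++ [idx] else acc) []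

-- the body of give_rank_treats' loop (one idx of the rank's index list)
def give_rank_step (dog_ranking : List Int) (number_of_treats : List Int) (idx : Int) : List Int :=
  if idx = 0 then
    if PySem.List.pyGetD dog_ranking idx 0 > PySem.List.pyGetD dog_ranking (idx + 1) 0 then
      PySem.List.pySetD number_of_treats idx (PySem.List.pyGetD number_of_treats (idx + 1) 0 + 1)
    else PySem.List.pySetD number_of_treats idx 1
  else if idx = (dog_ranking.length : Int) - 1 then
    if PySem.List.pyGetD dog_ranking idx 0 > PySem.List.pyGetD dog_ranking (idx - 1) 0 then
      PySem.List.pySetD number_of_treats idx (PySem.List.pyGetD number_of_treats (idx - 1) 0 + 1)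
    else PySem.List.pySetD number_of_treats idx 1
  else
    if PySem.List.pyGetD dog_ranking idx 0 > PySem.List.pyGetD dog_ranking (idx + 1) 0
        ∨ PySem.List.pyGetD dog_ranking idx 0 > PySem.List.pyGetD dog_ranking (idx - 1) 0 then
      PySem.List.pySetD number_of_treats idx
        (max (PySem.List.pyGetD number_of_treats (idx + 1) 0)
             (PySem.List.pyGetD number_of_treats (idx - 1) 0) + 1)
    else PySem.List.pySetD number_of_treats idx 1

def give_rank_treats (dog_ranking number_of_treats : List Int) (rank : Int) : List Int :=
  (find_indices_of_rank dog_ranking rank).foldl (give_rank_step dog_ranking) number_of_treats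

def min_treats (dog_ranking : List Int) : Int :=
  let number_of_treats : List Int := PySem.List.pyRepeat [0] (dog_ranking.length : Int)
  let ranking_ordered := dedupe_ascend dog_ranking
  (ranking_ordered.foldl (fun t rank =>
      if PySem.List.min? ranking_ordered (fun x => x) = some rank then
        (find_indices_of_rank dog_ranking rank).foldl
          (fun t idx => PySem.List.pySetD t idx 1) t
      else give_rank_treats dog_ranking t rank) number_of_treats).sum

-- ===== PORT B =====
-- the body of B's single loop (tuple key (dog_ranking[i], i) is Python's lexicographic order)
def alt_step (dog_ranking : List Int) (treats : List Int) (i : Int) : List Int :=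
  if i = 0 then
    PySem.List.pySetD treats 0
      (if PySem.List.pyGetD dog_ranking 0 0 > PySem.List.pyGetD dog_ranking 1 0 then
        PySem.List.pyGetD treats 1 0 + 1 else 1)
  else if i = (dog_ranking.length : Int) - 1 then
    PySem.List.pySetD treats i
      (if PySem.List.pyGetD dog_ranking i 0 > PySem.List.pyGetD dog_ranking (i - 1) 0 then
        PySem.List.pyGetD treats (i - 1) 0 + 1 else 1)
  else if PySem.List.pyGetD dog_ranking i 0 > PySem.List.pyGetD dog_ranking (i + 1) 0
      ∨ PySem.List.pyGetD dog_ranking i 0 > PySem.List.pyGetD dog_ranking (i - 1) 0 then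
    PySem.List.pySetD treats i
      (max (PySem.List.pyGetD treats (i + 1) 0) (PySem.List.pyGetD treats (i - 1) 0) + 1)
  else PySem.List.pySetD treats i 1

def min_treats_alt (dog_ranking : List Int) : Int :=
  let n : Int := dog_ranking.length
  if n ≤ 1 then n
  else
    let treats : List Int := PySem.List.pyRepeat [0] n
    ((PySem.List.sorted (PySem.List.pyRange 0 n 1)
        (fun i => toLex ((PySem.List.pyGetD dog_ranking i 0, i) : Int × Int))).foldl
      (alt_step dog_ranking) treats).sum

-- ===== PRECONDITION & SPEC =====
def Spec_min_treats (dog_ranking : List Int) (out : Int) : Prop := out = min_treats_alt dog_ranking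
instance (dog_ranking : List Int) (out : Int) : Decidable (Spec_min_treats dog_ranking out) := by unfold Spec_min_treats; infer_instance

-- ===== CLAIM (what is proved, stated in full; the proofs are below) =====
def Claim_equal_min_treats : Prop := ∀ (dog_ranking : List Int), Dom_min_treats dog_ranking → Spec_min_treats dog_ranking (min_treats dog_ranking)

-- dedupe foldl: no duplicates, same membership
lemma pv_dedupe_nodup (l : List Int) (acc : List Int) (h : acc.Nodup) :
    (l.foldl (fun acc rank => if rank ∈ acc then acc else acc ++ [rank]) acc).Nodup := by
  induction l generalizing acc with
  | nil => simpa
  | cons x l ih =>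
    simp only [List.foldl_cons]
    split
    · exact ih _ h
    · next hx =>
      refine ih _ ?_
      rw [List.nodup_append]
      refine ⟨h, by simp, ?_⟩
      intro a ha b hb
      have hbx : b = x := by simpa using hb
      intro e
      exact hx ((hbx ▸ e) ▸ ha)

lemma pv_dedupe_mem (l : List Int) (acc : List Int) (x : Int) :
    x ∈ l.foldl (fun acc rank => if rank ∈ acc then acc else acc ++ [rank]) acc
      ↔ x ∈ acc ∨ x ∈ l := by
  induction l generalizing acc with
  | nil => simp
  | cons y l ih =>
    simp only [List.foldl_cons]
    split
    · rw [ih]; constructor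
      · rintro (h | h)
        · exact Or.inl h
        · exact Or.inr (by simp [h])
      · rintro (h | h)
        · exact Or.inl h
        · rcases List.mem_cons.mp h with h | h
          · subst h; exact Or.inl (by assumption)
          · exact Or.inr h
    · rw [ih]; simp [or_assoc]

lemma pv_ranks_pairwise (d : List Int) : (dedupe_ascend d).Pairwise (· < ·) := by
  unfold dedupe_ascend
  have hle := PySem.List.sorted_pairwise
    (d.foldl (fun acc rank => if rank ∈ acc then acc else acc ++ [rank]) []) (fun x => x)
  have hnd : (PySem.List.sorted
      (d.foldl (fun acc rank => if rank ∈ acc then acc else acc ++ [rank]) []) (fun x => x)).Nodup :=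
    (PySem.List.sorted_perm _ _ _).nodup_iff.mpr (pv_dedupe_nodup d [] (by simp))
  exact (hle.and hnd).imp (fun h => lt_of_le_of_ne h.1 h.2)

lemma pv_ranks_mem (d : List Int) (x : Int) : x ∈ dedupe_ascend d ↔ x ∈ d := by
  unfold dedupe_ascend
  rw [PySem.List.mem_sorted, pv_dedupe_mem]
  simp

lemma pv_find_eq_filter (d : List Int) (r : Int) :
    find_indices_of_rank d r
      = (PySem.List.pyRange 0 (d.length : Int) 1).filter
          (fun i => decide (PySem.List.pyGetD d i 0 = r)) := by
  unfold find_indices_of_rank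
  have h := PySem.List.foldl_append_if (fun i => decide (PySem.List.pyGetD d i 0 = r))
    (fun i => i) (PySem.List.pyRange 0 (d.length : Int) 1) []
  simpa using h

lemma pv_pyGetD_mem (d : List Int) {j : Int} (h0 : 0 ≤ j) (h1 : j < (d.length : Int)) :
    PySem.List.pyGetD d j 0 ∈ d := by
  rw [PySem.List.pyGetD_of_nonneg _ _ h0]
  have hj : j.toNat < d.length := by omega
  rw [List.getD_eq_getElem _ _ hj]
  exact List.getElem_mem _

lemma pv_mem_find (d : List Int) (r i : Int) (h : i ∈ find_indices_of_rank d r) :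
    0 ≤ i ∧ i < (d.length : Int) ∧ PySem.List.pyGetD d i 0 = r := by
  rw [pv_find_eq_filter] at h
  have := List.mem_filter.mp h
  rcases this with ⟨hm, hd⟩
  rcases PySem.List.mem_pyRange_one.mp hm with ⟨h0, h1⟩
  exact ⟨h0, h1, by simpa using hd⟩

-- the index-block decomposition: flatMap of per-rank filters is a permutation of range
lemma pv_filter_cons_perm (xs : List Int) (key : Int → Int) (r : Int) (ks : List Int) (hr : r ∉ ks) :
    (xs.filter (fun x => decide (key x ∈ r :: ks))).Perm
      (xs.filter (fun x => decide (key x = r)) ++ xs.filter (fun x => decide (key x ∈ ks))) := by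
  induction xs with
  | nil => simp
  | cons x xs ih =>
    by_cases h1 : key x = r
    · have h2 : key x ∉ ks := h1 ▸ hr
      simp only [List.filter_cons, h1]
      simpa [hr] using ih.cons x
    · by_cases h2 : key x ∈ ks
      · have : (x :: (xs.filter (fun x => decide (key x = r)) ++ xs.filter (fun x => decide (key x ∈ ks)))).Perm
            (xs.filter (fun x => decide (key x = r)) ++ x :: xs.filter (fun x => decide (key x ∈ ks))) :=
          List.perm_middle.symm
        simp only [List.filter_cons, h1, h2]
        simpa [h1, h2] using (ih.cons x).trans this
      · simp only [List.filter_cons, h1, h2]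
        simpa [h1, h2] using ih

lemma pv_flatMap_filter_perm (xs : List Int) (key : Int → Int) (ks : List Int) (hnd : ks.Nodup) :
    (ks.flatMap (fun r => xs.filter (fun x => decide (key x = r)))).Perm
      (xs.filter (fun x => decide (key x ∈ ks))) := by
  induction ks with
  | nil => simp
  | cons r ks ih =>
    rcases List.nodup_cons.mp hnd with ⟨hr, hnd'⟩
    simp only [List.flatMap_cons]
    exact ((ih hnd').append_left _).trans (pv_filter_cons_perm xs key r ks hr).symm

lemma pv_jobs_perm (d : List Int) :
    ((dedupe_ascend d).flatMap (find_indices_of_rank d)).Perm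
      (PySem.List.pyRange 0 (d.length : Int) 1) := by
  have hnd : (dedupe_ascend d).Nodup := (pv_ranks_pairwise d).imp (fun h => ne_of_lt h)
  rw [show find_indices_of_rank d
      = (fun r => (PySem.List.pyRange 0 (d.length : Int) 1).filter
          (fun i => decide (PySem.List.pyGetD d i 0 = r))) from funext (pv_find_eq_filter d)]
  refine (pv_flatMap_filter_perm _ (fun i => PySem.List.pyGetD d i 0) _ hnd).trans ?_
  have : (PySem.List.pyRange 0 (d.length : Int) 1).filter
      (fun i => decide (PySem.List.pyGetD d i 0 ∈ dedupe_ascend d))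
      = PySem.List.pyRange 0 (d.length : Int) 1 := by
    apply List.filter_eq_self.mpr
    intro i hi
    rcases PySem.List.mem_pyRange_one.mp hi with ⟨h0, h1'⟩
    exact decide_eq_true ((pv_ranks_mem d _).mpr (pv_pyGetD_mem d h0 h1'))
  rw [this]

lemma pv_jobs_pairwise (d : List Int) :
    ((dedupe_ascend d).flatMap (find_indices_of_rank d)).Pairwise
      (fun a b => (fun i => toLex ((PySem.List.pyGetD d i 0, i) : Int × Int)) a
        < (fun i => toLex ((PySem.List.pyGetD d i 0, i) : Int × Int)) b) := by
  rw [List.pairwise_flatMap]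
  constructor
  · intro r _
    rw [pv_find_eq_filter]
    have hp := (PySem.List.pairwise_lt_pyRange_one 0 (d.length : Int)).filter
      (fun i => decide (PySem.List.pyGetD d i 0 = r))
    refine hp.imp_of_mem (fun {a b} ha hb hab => ?_)
    have ha' := (List.mem_filter.mp ha).2
    have hb' := (List.mem_filter.mp hb).2
    rw [Prod.Lex.lt_iff]
    right
    constructor
    · simp only [decide_eq_true_eq] at ha' hb'
      simp [ha', hb']
    · exact hab
  · refine (pv_ranks_pairwise d).imp (fun {r₁ r₂} h12 => ?_)
    intro x hx y hy
    rcases pv_mem_find d r₁ x hx with ⟨_, _, hxv⟩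
    rcases pv_mem_find d r₂ y hy with ⟨_, _, hyv⟩
    rw [Prod.Lex.lt_iff]
    left
    simp [hxv, hyv, h12]

lemma pv_alt_step_eq (d : List Int) : alt_step d = give_rank_step d := by
  funext t i
  unfold alt_step give_rank_step
  by_cases h : i = 0
  · subst h
    norm_num
    split_ifs <;> rfl
  · simp only [h, if_false]
    split_ifs <;> rfl

lemma pv_min_step_eq (d : List Int) (r : Int) (hn : 2 ≤ d.length)
    (hmin : ∀ x ∈ d, r ≤ x) (t : List Int) (i : Int) (hi : i ∈ find_indices_of_rank d r) :
    PySem.List.pySetD t i 1 = give_rank_step d t i := by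
  rcases pv_mem_find d r i hi with ⟨h0, h1, hv⟩
  unfold give_rank_step
  by_cases hi0 : i = 0
  · subst hi0
    have hnb : PySem.List.pyGetD d 1 0 ∈ d := pv_pyGetD_mem d (by norm_num) (by omega)
    have hc : ¬ PySem.List.pyGetD d 0 0 > PySem.List.pyGetD d (0 + 1) 0 := by
      have := hmin _ hnb
      simp only [zero_add]
      omega
    rw [if_pos rfl, if_neg hc]
  · by_cases hil : i = (d.length : Int) - 1
    · have hnb : PySem.List.pyGetD d (i - 1) 0 ∈ d := pv_pyGetD_mem d (by omega) (by omega)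
      have hc : ¬ PySem.List.pyGetD d i 0 > PySem.List.pyGetD d (i - 1) 0 := by
        have := hmin _ hnb
        omega
      rw [if_neg hi0, if_pos hil, if_neg hc]
    · have hnb1 : PySem.List.pyGetD d (i + 1) 0 ∈ d := pv_pyGetD_mem d (by omega) (by omega)
      have hnb2 : PySem.List.pyGetD d (i - 1) 0 ∈ d := pv_pyGetD_mem d (by omega) (by omega)
      have hc : ¬ (PySem.List.pyGetD d i 0 > PySem.List.pyGetD d (i + 1) 0
          ∨ PySem.List.pyGetD d i 0 > PySem.List.pyGetD d (i - 1) 0) := by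
        have := hmin _ hnb1
        have := hmin _ hnb2
        omega
      rw [if_neg hi0, if_neg hil, if_neg hc]

lemma pv_A_fold_eq (d : List Int) (hn : 2 ≤ d.length) (t0 : List Int) :
    (dedupe_ascend d).foldl (fun t rank =>
        if PySem.List.min? (dedupe_ascend d) (fun x => x) = some rank then
          (find_indices_of_rank d rank).foldl (fun t idx => PySem.List.pySetD t idx 1) t
        else give_rank_treats d t rank) t0
      = ((dedupe_ascend d).flatMap (find_indices_of_rank d)).foldl (give_rank_step d) t0 := by
  rw [List.foldl_flatMap]
  apply PySem.List.foldl_congr_mem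
  intro t r _
  split_ifs with h
  · apply PySem.List.foldl_congr_mem
    intro t' i hi
    have hmin : ∀ x ∈ d, r ≤ x := by
      intro x hx
      exact PySem.List.min?_isMin h x ((pv_ranks_mem d x).mpr hx)
    exact pv_min_step_eq d r hn hmin t' i hi
  · rfl

-- ===== VERDICT (by name: the statement is the Claim_ definition above) =====
theorem min_treats_spec : Claim_equal_min_treats := by
  intro d _
  unfold Spec_min_treats
  match d with
  | [] => rfl
  | [x] =>
    show min_treats [x] = min_treats_alt [x]
    have hranks : dedupe_ascend [x] = [x] := by
      simp only [dedupe_ascend, List.foldl_cons, List.foldl_nil]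
      rw [if_neg (by simp), List.nil_append]
      exact PySem.List.sorted_eq_of_perm_of_pairwise_lt _ _ _ (by simp) (by simp)
    have hget : PySem.List.pyGetD [x] (0 : Int) 0 = x := by
      rw [PySem.List.pyGetD_of_nonneg _ _ le_rfl]; rfl
    have hrange : PySem.List.pyRange 0 (([x].length : Int)) 1 = [0] := by
      simpa using PySem.List.pyRange_one_singleton 0
    have hfind : find_indices_of_rank [x] x = [0] := by
      rw [pv_find_eq_filter, hrange]
      simp [hget]
    have hmin : PySem.List.min? [x] (fun y => y) = some x := by
      simpa using PySem.List.min?_id_cons x []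
    simp only [min_treats, min_treats_alt, hranks, hfind, hmin, List.foldl_cons, List.foldl_nil]
    rw [if_pos trivial, if_pos (by norm_num)]
    norm_num [PySem.List.pyRepeat_singleton, PySem.List.pySetD_of_nonneg]
  | a :: b :: rest =>
    have hn : 2 ≤ (a :: b :: rest).length := by simp
    show min_treats (a :: b :: rest) = min_treats_alt (a :: b :: rest)
    have hS := PySem.List.sorted_eq_of_perm_of_pairwise_lt
        (PySem.List.pyRange 0 (((a :: b :: rest)).length : Int) 1)
        ((dedupe_ascend (a :: b :: rest)).flatMap (find_indices_of_rank (a :: b :: rest)))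
        (fun i => toLex ((PySem.List.pyGetD (a :: b :: rest) i 0, i) : Int × Int))
        (pv_jobs_perm _) (pv_jobs_pairwise _)
    simp only [min_treats, min_treats_alt]
    rw [if_neg (by simp)]
    rw [hS, pv_alt_step_eq, pv_A_fold_eq (a :: b :: rest) hn]
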